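-- pv_equiv track=rewrite | github.com/gotr00t0day/rootX | script_engine.py | _func_reptok
-- ===== SOURCE A (Python) =====
-- def _func_reptok(text: str, old_token: str, new_token: str, delim: int) -> str:
--     """Replace token in delimited text"""
--     try:
--         delimiter = chr(delim)
--         tokens = text.split(delimiter)
--         tokens = [new_token if t == old_token else t for t in tokens]
--         return delimiter.join(tokens)
--     except:
--         return text
-- ===== SOURCE B (Python) =====
-- def _func_reptok(text: str, old_token: str, new_token: str, delim: int) -> str:
--     """Replace token in delimited text"""
--     try:
--         delimiter = chr(delim)
--     except (ValueError, OverflowError, TypeError):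
--         return text
--     out = []
--     buf = ""
--     for ch in text:
--         if ch == delimiter:
--             out.append(new_token if buf == old_token else buf)
--             out.append(delimiter)
--             buf = ""
--         else:
--             buf += ch
--     out.append(new_token if buf == old_token else buf)
--     return "".join(out)
-- ===== Notes on version B (the rewrite author's own statement) =====
-- stated objective: alternative
-- what changed: Replaces the split/list-comprehension/join pipeline with a single character-by-character scan maintaining a token buffer, flushing the (possibly replaced) buffer at each delimiter and at the end.
import Mathlib
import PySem

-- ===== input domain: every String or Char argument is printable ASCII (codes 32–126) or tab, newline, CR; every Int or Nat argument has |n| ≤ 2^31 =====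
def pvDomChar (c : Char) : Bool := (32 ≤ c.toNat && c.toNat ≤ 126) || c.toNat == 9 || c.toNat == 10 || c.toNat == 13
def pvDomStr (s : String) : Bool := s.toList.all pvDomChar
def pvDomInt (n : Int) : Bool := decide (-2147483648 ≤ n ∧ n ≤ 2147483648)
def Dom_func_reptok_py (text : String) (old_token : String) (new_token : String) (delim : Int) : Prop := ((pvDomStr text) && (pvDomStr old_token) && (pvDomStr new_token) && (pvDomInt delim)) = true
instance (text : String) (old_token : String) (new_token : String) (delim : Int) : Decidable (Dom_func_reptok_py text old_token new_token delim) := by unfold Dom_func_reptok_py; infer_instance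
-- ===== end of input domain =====

-- B replaces A's split/replace/join pipeline with a single character scan keeping a token buffer (alternative decomposition, same cost).


-- ===== PORT A =====
-- text.split(delimiter) for a one-character delimiter: a char ch matches iff ord(ch) = d
-- (exact: Python compares ch == chr(d) iff ch's code point is d; empty tokens kept, '' splits to ['']).
def pvSplitA (d : Nat) : List Char → List (List Char)
  | [] => [[]]
  | c :: cs =>
    let r := pvSplitA d cs
    if c.toNat = d then [] :: r else (c :: r.headD []) :: r.tail

-- delimiter.join(tokens)
def pvJoinA (sep : List Char) : List (List Char) → List Char
  | [] => []
  | [t] => t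
  | t :: ts => t ++ sep ++ pvJoinA sep ts

-- chr(delim) raises ValueError outside 0..0x10FFFF (the bare except then returns text);
-- inside that range the whole pipeline runs.
def func_reptok_py (text : String) (old_token : String) (new_token : String) (delim : Int) : String :=
  if 0 ≤ delim ∧ delim ≤ 0x10FFFF then
    let d := delim.toNat
    let tokens := pvSplitA d text.toList
    let tokens := tokens.map (fun t => if t = old_token.toList then new_token.toList else t)
    String.mk (pvJoinA [Char.ofNat d] tokens)
  else text

-- ===== PORT B =====
-- the scan loop of Source B: buf is the pending token; on a delimiter char flush the
-- (possibly replaced) buffer plus the delimiter itself; at the end flush the buffer.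
-- ch == delimiter is compared as ch's code point = d (exact, as above).
def pvScanB (d : Nat) (oldT newT : List Char) : List Char → List Char → List Char
  | buf, [] => if buf = oldT then newT else buf
  | buf, c :: cs =>
    if c.toNat = d then (if buf = oldT then newT else buf) ++ c :: pvScanB d oldT newT [] cs
    else pvScanB d oldT newT (buf ++ [c]) cs

def func_reptok_py_alt (text : String) (old_token : String) (new_token : String) (delim : Int) : String :=
  if 0 ≤ delim ∧ delim ≤ 0x10FFFF then
    String.mk (pvScanB delim.toNat old_token.toList new_token.toList [] text.toList)
  else text

-- ===== PRECONDITION & SPEC =====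
def Spec_func_reptok_py (text : String) (old_token : String) (new_token : String) (delim : Int) (out : String) : Prop := out = func_reptok_py_alt text old_token new_token delim
instance (text : String) (old_token : String) (new_token : String) (delim : Int) (out : String) : Decidable (Spec_func_reptok_py text old_token new_token delim out) := by unfold Spec_func_reptok_py; infer_instance

-- ===== CLAIM (what is proved, stated in full; the proofs are below) =====
def Claim_equal_func_reptok_py : Prop := ∀ (text : String) (old_token : String) (new_token : String) (delim : Int), Dom_func_reptok_py text old_token new_token delim → Spec_func_reptok_py text old_token new_token delim (func_reptok_py text old_token new_token delim)

-- ===== LEMMAS AND PROOFS =====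

theorem pvSplitA_ne_nil (d : Nat) (cs : List Char) : pvSplitA d cs ≠ [] := by
  cases cs with
  | nil => simp [pvSplitA]
  | cons c cs =>
    simp only [pvSplitA]
    split <;> simp

-- the scan with pending buffer buf equals the replaced join of the split whose first token is prefixed by buf
theorem pvScanB_eq (d : Nat) (oldT newT : List Char) (cs : List Char) :
    ∀ buf, pvScanB d oldT newT buf cs
      = pvJoinA [Char.ofNat d]
          (((buf ++ (pvSplitA d cs).headD []) :: (pvSplitA d cs).tail).map
            (fun t => if t = oldT then newT else t)) := by
  induction cs with
  | nil => intro buf; simp [pvScanB, pvSplitA, pvJoinA]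
  | cons c cs ih =>
    intro buf
    by_cases h : c.toNat = d
    · have hc : Char.ofNat d = c := by rw [← h]; exact Char.ofNat_toNat c
      obtain ⟨t, ts, hts⟩ : ∃ t ts, pvSplitA d cs = t :: ts := by
        cases hs : pvSplitA d cs with
        | nil => exact absurd hs (pvSplitA_ne_nil d cs)
        | cons t ts => exact ⟨t, ts, rfl⟩
      simp only [pvScanB, pvSplitA, if_pos h, hts, List.headD_cons, List.tail_cons,
        List.map_cons, ih [], List.nil_append, pvJoinA, hc]
      cases ts <;> simp [pvJoinA]
    · obtain ⟨t, ts, hts⟩ : ∃ t ts, pvSplitA d cs = t :: ts := by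
        cases hs : pvSplitA d cs with
        | nil => exact absurd hs (pvSplitA_ne_nil d cs)
        | cons t ts => exact ⟨t, ts, rfl⟩
      simp only [pvScanB, pvSplitA, if_neg h, hts, List.headD_cons, List.tail_cons,
        List.map_cons, ih (buf ++ [c])]
      simp [List.append_assoc]

-- ===== VERDICT (by name: the statement is the Claim_ definition above) =====
theorem func_reptok_py_spec : Claim_equal_func_reptok_py := by
  intro text old_token new_token delim _
  unfold Spec_func_reptok_py func_reptok_py func_reptok_py_alt
  split
  · obtain ⟨t, ts, hts⟩ : ∃ t ts, pvSplitA delim.toNat text.toList = t :: ts := by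
      cases hs : pvSplitA delim.toNat text.toList with
      | nil => exact absurd hs (pvSplitA_ne_nil _ _)
      | cons t ts => exact ⟨t, ts, rfl⟩
    simp [pvScanB_eq, hts]
  · rfl
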